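-- pv_equiv track=rewrite | github.com/chengkml/nquiz | skills/nquiz-requirement-develop/scripts/develop_requirement.py | parse_progress_milestones
-- ===== SOURCE A (Python) =====
-- from typing import Any, Dict, List, Optional, Sequence, Tuple
--
-- DEFAULT_PROGRESS_MILESTONES = [30, 60, 90]
--
-- def normalize_text(value: Any) -> str:
--     if value is None:
--         return ""
--     return str(value).strip()
--
-- def parse_progress_milestones(raw: Optional[str]) -> List[int]:
--     if raw is None or normalize_text(raw) == "":
--         return list(DEFAULT_PROGRESS_MILESTONES)
--
--     vals: List[int] = []
--     seen = set()
--     for part in raw.split(","):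
--         part = normalize_text(part)
--         if not part:
--             continue
--         try:
--             num = int(part)
--         except ValueError:
--             raise ValueError(f"progress-milestones 非整数: {part}")
--
--         if num < 1 or num > 99:
--             raise ValueError("progress-milestones 取值范围必须是 1-99")
--
--         if num not in seen:
--             seen.add(num)
--             vals.append(num)
--
--     if not vals:
--         raise ValueError("progress-milestones 不能为空")
--
--     vals.sort()
--     return vals
-- ===== SOURCE B (Python) =====
-- from typing import Any, List, Optional
--
-- DEFAULT_PROGRESS_MILESTONES = [30, 60, 90]
--
-- def normalize_text(value: Any) -> str:
--     if value is None:
--         return ""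
--     return str(value).strip()
--
-- def _milestone_num(part: str) -> int:
--     try:
--         num = int(part)
--     except ValueError:
--         raise ValueError(f"progress-milestones 非整数: {part}")
--     if num < 1 or num > 99:
--         raise ValueError("progress-milestones 取值范围必须是 1-99")
--     return num
--
-- def parse_progress_milestones(raw: Optional[str]) -> List[int]:
--     if raw is None or normalize_text(raw) == "":
--         return list(DEFAULT_PROGRESS_MILESTONES)
--
--     parts = [p for p in (normalize_text(x) for x in raw.split(",")) if p]
--     nums = [_milestone_num(p) for p in parts]
--
--     if not nums:
--         raise ValueError("progress-milestones 不能为空")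
--
--     return [n for n in range(1, 100) if n in nums]
-- ===== Notes on version B (the rewrite author's own statement) =====
-- stated objective: alternative
-- what changed: Replaces A's single loop with seen-set dedup, append and final sort by staged passes: strip-and-filter the parts, map them through a validating helper to a plain (possibly duplicated) int list, then build the result as an ascending membership sweep over range(1,100), so no seen-set and no sort are needed.
import Mathlib
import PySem

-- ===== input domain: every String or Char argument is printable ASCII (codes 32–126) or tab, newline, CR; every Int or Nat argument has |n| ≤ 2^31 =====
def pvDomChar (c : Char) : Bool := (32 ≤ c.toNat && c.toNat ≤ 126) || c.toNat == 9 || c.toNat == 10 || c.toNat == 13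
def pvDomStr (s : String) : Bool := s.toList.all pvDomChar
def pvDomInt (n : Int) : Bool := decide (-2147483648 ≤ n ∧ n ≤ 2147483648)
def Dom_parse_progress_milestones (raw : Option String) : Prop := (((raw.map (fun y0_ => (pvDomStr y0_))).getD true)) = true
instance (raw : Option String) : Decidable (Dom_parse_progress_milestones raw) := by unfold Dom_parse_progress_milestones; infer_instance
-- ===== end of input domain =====

-- B replaces A's single validation loop with seen-set dedup and a final sort by staged
-- passes (strip+filter, validate-map to ints, ascending membership sweep over 1..99);
-- objective: alternative (no sort, no dedup set).

-- ===== PORT A =====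
def DEFAULT_PROGRESS_MILESTONES : List Int := [30, 60, 90]

-- s.split(",") — the separator is non-empty, so Str.split? is always `some`; exact on that domain
def pvSplitComma (s : String) : List String := (PySem.Str.split? s ",").getD []

-- normalize_text on a str argument is exactly str.strip(); ported as PySem.Str.strip.

-- the validation loop of A: state (vals, seen); none = ValueError (excluded by Pre_)
def pvAloop : List String → List Int → List Int → Option (List Int × List Int)
  | [], vals, seen => some (vals, seen)
  | p :: rest, vals, seen =>
    let part := PySem.Str.strip p
    if part = "" then pvAloop rest vals seen
    else
      match PySem.Int.ofStr? part with
      | none => none                                   -- ValueError 非整数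
      | some num =>
        if num < 1 ∨ 99 < num then none                -- ValueError 取值范围
        else if num ∈ seen then pvAloop rest vals seen
        else pvAloop rest (vals ++ [num]) (seen ++ [num])

def parse_progress_milestones (raw : Option String) : List Int :=
  match raw with
  | none => DEFAULT_PROGRESS_MILESTONES
  | some s =>
    if PySem.Str.strip s = "" then DEFAULT_PROGRESS_MILESTONES
    else
      match pvAloop (pvSplitComma s) [] [] with
      | none => []                                     -- ValueError (excluded by Pre_)
      | some (vals, _) =>
        if vals = [] then []                           -- ValueError 不能为空 (excluded by Pre_)
        else PySem.List.sorted vals (fun x => x) false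

-- ===== PORT B =====
-- B's helper _milestone_num: none = ValueError (excluded by Pre_)
def pvMilestoneNum? (part : String) : Option Int :=
  match PySem.Int.ofStr? part with
  | none => none                                       -- ValueError 非整数
  | some num => if num < 1 ∨ 99 < num then none else some num   -- ValueError 取值范围

def parse_progress_milestones_alt (raw : Option String) : List Int :=
  match raw with
  | none => DEFAULT_PROGRESS_MILESTONES
  | some s =>
    if PySem.Str.strip s = "" then DEFAULT_PROGRESS_MILESTONES
    else
      let parts := ((pvSplitComma s).map PySem.Str.strip).filter (fun p => p ≠ "")
      match parts.mapM pvMilestoneNum? with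
      | none => []                                     -- ValueError (excluded by Pre_)
      | some nums =>
        if nums = [] then []                           -- ValueError 不能为空 (excluded by Pre_)
        else (PySem.List.pyRange 1 100 1).filter (fun n => nums.contains n)

-- ===== PRECONDITION & SPEC =====
-- Pre_ admits exactly the inputs where Python A returns: raw is None / blank (default branch),
-- or every non-blank comma part parses as an int in 1..99 and at least one part is non-blank.
def pvOkPart (p : String) : Bool :=
  PySem.Str.strip p == "" ||
    (match PySem.Int.ofStr? (PySem.Str.strip p) with
     | some n => decide (1 ≤ n ∧ n ≤ 99)
     | none => false)

def Pre_parse_progress_milestones (raw : Option String) : Prop :=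
  match raw with
  | none => True
  | some s =>
    PySem.Str.strip s = "" ∨
      ((pvSplitComma s).all pvOkPart = true ∧
       (pvSplitComma s).any (fun p => PySem.Str.strip p != "") = true)

instance (raw : Option String) : Decidable (Pre_parse_progress_milestones raw) := by
  unfold Pre_parse_progress_milestones; cases raw <;> infer_instance

def pvWitness_parse_progress_milestones : Option String := some "3, 2,,2,30 ,1"

def Spec_parse_progress_milestones (raw : Option String) (out : List Int) : Prop := out = parse_progress_milestones_alt raw
instance (raw : Option String) (out : List Int) : Decidable (Spec_parse_progress_milestones raw out) := by unfold Spec_parse_progress_milestones; infer_instance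

-- ===== CLAIM (what is proved, stated in full; the proofs are below) =====
def Claim_equal_parse_progress_milestones : Prop := ∀ (raw : Option String), Dom_parse_progress_milestones raw → Pre_parse_progress_milestones raw → Spec_parse_progress_milestones raw (parse_progress_milestones raw)

-- ===== LEMMAS AND PROOFS =====

-- the ints named by the non-blank parts, in order (with duplicates)
def pvNums (parts : List String) : List Int :=
  parts.filterMap (fun p =>
    if PySem.Str.strip p = "" then none else PySem.Int.ofStr? (PySem.Str.strip p))

lemma pvOkPart_elim {p : String} (hok : pvOkPart p = true) (hne : PySem.Str.strip p ≠ "") :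
    ∃ n, PySem.Int.ofStr? (PySem.Str.strip p) = some n ∧ 1 ≤ n ∧ n ≤ 99 := by
  unfold pvOkPart at hok
  cases h : PySem.Int.ofStr? (PySem.Str.strip p) with
  | none => simp [h, hne] at hok
  | some n => simp [h, hne] at hok; exact ⟨n, rfl, hok⟩

-- step equations of A's loop (discharging the in-loop tests once)
lemma pvAloop_skip {p : String} (rest : List String) (vals seen : List Int)
    (hE : PySem.Str.strip p = "") :
    pvAloop (p :: rest) vals seen = pvAloop rest vals seen := by
  simp only [pvAloop]; rw [if_pos hE]

lemma pvAloop_step {p : String} {num : Int} (rest : List String) (vals seen : List Int)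
    (hE : PySem.Str.strip p ≠ "") (hparse : PySem.Int.ofStr? (PySem.Str.strip p) = some num)
    (h1n : 1 ≤ num) (h99 : num ≤ 99) :
    pvAloop (p :: rest) vals seen =
      (if num ∈ seen then pvAloop rest vals seen
       else pvAloop rest (vals ++ [num]) (seen ++ [num])) := by
  simp only [pvAloop]; rw [if_neg hE, hparse]
  dsimp only
  rw [if_neg (by omega : ¬(num < 1 ∨ 99 < num))]

lemma pvAloop_spec (parts : List String) (vals : List Int)
    (hok : parts.all pvOkPart = true) (hnd : vals.Nodup)
    (hb : ∀ n ∈ vals, 1 ≤ n ∧ n ≤ 99) :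
    ∃ vals', pvAloop parts vals vals = some (vals', vals') ∧ vals'.Nodup ∧
      (∀ n, n ∈ vals' ↔ n ∈ vals ∨ n ∈ pvNums parts) ∧
      (∀ n ∈ vals', 1 ≤ n ∧ n ≤ 99) := by
  induction parts generalizing vals with
  | nil => exact ⟨vals, rfl, hnd, by simp [pvNums], hb⟩
  | cons p rest ih =>
    simp only [List.all_cons, Bool.and_eq_true] at hok
    obtain ⟨hp, hrest⟩ := hok
    by_cases hE : PySem.Str.strip p = ""
    · obtain ⟨v', h1, h2, h3, h4⟩ := ih vals hrest hnd hb
      refine ⟨v', ?_, h2, ?_, h4⟩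
      · rw [pvAloop_skip rest vals vals hE]; exact h1
      · intro n
        have hnumsE : pvNums (p :: rest) = pvNums rest := by simp [pvNums, hE]
        rw [hnumsE]; exact h3 n
    · obtain ⟨num, hparse, h1n, h99⟩ := pvOkPart_elim hp hE
      have hnums : pvNums (p :: rest) = num :: pvNums rest := by
        simp [pvNums, hE, hparse]
      by_cases hmem : num ∈ vals
      · obtain ⟨v', h1, h2, h3, h4⟩ := ih vals hrest hnd hb
        refine ⟨v', ?_, h2, ?_, h4⟩
        · rw [pvAloop_step rest vals vals hE hparse h1n h99, if_pos hmem]; exact h1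
        · intro n; rw [hnums, h3 n]
          have hsub : n = num → n ∈ vals := fun h => h ▸ hmem
          simp only [List.mem_cons]
          constructor
          · rintro (h | h)
            · exact Or.inl h
            · exact Or.inr (Or.inr h)
          · rintro (h | h | h)
            · exact Or.inl h
            · exact Or.inl (hsub h)
            · exact Or.inr h
      · have hnd' : (vals ++ [num]).Nodup := by
          rw [List.nodup_append]
          refine ⟨hnd, List.nodup_singleton num, ?_⟩
          intro a ha b hbm heq
          rw [List.mem_singleton] at hbm
          subst hbm; subst heq
          exact hmem ha
        have hb' : ∀ n ∈ vals ++ [num], 1 ≤ n ∧ n ≤ 99 := by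
          intro n hn
          rcases List.mem_append.mp hn with h | h
          · exact hb n h
          · simp at h; exact h ▸ ⟨h1n, h99⟩
        obtain ⟨v', h1, h2, h3, h4⟩ := ih (vals ++ [num]) hrest hnd' hb'
        refine ⟨v', ?_, h2, ?_, h4⟩
        · rw [pvAloop_step rest vals vals hE hparse h1n h99, if_neg hmem]; exact h1
        · intro n; rw [hnums, h3 n]
          simp only [List.mem_append, List.mem_cons, List.not_mem_nil, or_false]
          constructor
          · rintro ((h | h) | h)
            · exact Or.inl h
            · exact Or.inr (Or.inl h)
            · exact Or.inr (Or.inr h)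
          · rintro (h | h | h)
            · exact Or.inl (Or.inl h)
            · exact Or.inl (Or.inr h)
            · exact Or.inr h

-- B's staged passes compute exactly the in-order multiset of named ints
lemma pvBnums_eq (parts : List String) (hok : parts.all pvOkPart = true) :
    (((parts.map PySem.Str.strip).filter (fun p => p ≠ "")).mapM pvMilestoneNum?)
      = some (pvNums parts) := by
  induction parts with
  | nil => simp [pvNums]
  | cons p rest ih =>
    simp only [List.all_cons, Bool.and_eq_true] at hok
    obtain ⟨hp, hrest⟩ := hok
    by_cases hE : PySem.Str.strip p = ""
    · simpa [pvNums, hE] using ih hrest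
    · obtain ⟨num, hparse, h1n, h99⟩ := pvOkPart_elim hp hE
      have hm : pvMilestoneNum? (PySem.Str.strip p) = some num := by
        unfold pvMilestoneNum?
        rw [hparse]
        dsimp only
        rw [if_neg (by omega : ¬(num < 1 ∨ 99 < num))]
      have ih' := ih hrest
      simp only [ne_eq, decide_not] at ih'
      simp [pvNums, hE, hparse, List.mapM_cons, hm, ih']

lemma pvNums_bounds {parts : List String} (hok : parts.all pvOkPart = true) :
    ∀ n ∈ pvNums parts, 1 ≤ n ∧ n ≤ 99 := by
  intro n hn
  unfold pvNums at hn
  obtain ⟨p, hp, hparse⟩ := List.mem_filterMap.mp hn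
  have hpok := List.all_eq_true.mp hok p hp
  by_cases hE : PySem.Str.strip p = ""
  · simp [hE] at hparse
  · obtain ⟨m, hm, h1, h9⟩ := pvOkPart_elim hpok hE
    simp [hE, hm] at hparse
    exact hparse ▸ ⟨h1, h9⟩

lemma pvNums_ne_nil {parts : List String} (hok : parts.all pvOkPart = true)
    (hany : parts.any (fun p => PySem.Str.strip p != "") = true) :
    pvNums parts ≠ [] := by
  obtain ⟨p, hp, hne⟩ := List.any_eq_true.mp hany
  have hne' : PySem.Str.strip p ≠ "" := by simpa using hne
  have hpok := List.all_eq_true.mp hok p hp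
  obtain ⟨m, hm, _, _⟩ := pvOkPart_elim hpok hne'
  have : m ∈ pvNums parts := by
    unfold pvNums
    exact List.mem_filterMap.mpr ⟨p, hp, by simp [hne', hm]⟩
  intro h; rw [h] at this; simp at this

lemma pyRange_1_100_pairwise : (PySem.List.pyRange 1 100 1).Pairwise (· < ·) := by decide

-- ===== VERDICT (by name: the statement is the Claim_ definition above) =====
theorem parse_progress_milestones_spec : Claim_equal_parse_progress_milestones := by
  intro raw _hdom hpre
  unfold Spec_parse_progress_milestones
  match raw with
  | none => rfl
  | some s =>
    by_cases hblank : PySem.Str.strip s = ""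
    · simp [parse_progress_milestones, parse_progress_milestones_alt, hblank]
    · unfold Pre_parse_progress_milestones at hpre
      rcases hpre with h | ⟨hok, hany⟩
      · exact absurd h hblank
      set parts := pvSplitComma s with hparts
      have hnn := pvNums_ne_nil hok hany
      obtain ⟨vals', hA, hnd, hmemA, hbnd⟩ :=
        pvAloop_spec parts [] hok List.nodup_nil (by simp)
      have hB := pvBnums_eq parts hok
      have hmemA' : ∀ n, n ∈ vals' ↔ n ∈ pvNums parts := by
        intro n; rw [hmemA n]; simp
      have hvne : vals' ≠ [] := by
        obtain ⟨m, hm⟩ := List.exists_mem_of_ne_nil _ hnn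
        intro h
        have := (hmemA' m).mpr hm
        rw [h] at this; simp at this
      -- the filtered ascending sweep
      set L := (PySem.List.pyRange 1 100 1).filter (fun n => (pvNums parts).contains n) with hL
      have hmemL : ∀ n : Int, n ∈ L ↔ n ∈ pvNums parts := by
        intro n
        rw [hL, List.mem_filter, PySem.List.mem_pyRange_one]
        constructor
        · rintro ⟨_, hpr⟩
          simpa using hpr
        · intro hn
          have hb := pvNums_bounds hok n hn
          exact ⟨⟨by omega, by omega⟩, by simpa using hn⟩
      have hLpw : L.Pairwise (· < ·) := List.Pairwise.filter _ pyRange_1_100_pairwise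
      have hLnd : L.Nodup := hLpw.imp (fun h => by omega)
      have hperm : L.Perm vals' := by
        rw [List.perm_ext_iff_of_nodup hLnd hnd]
        intro n; rw [hmemL n, hmemA' n]
      have hsorted : PySem.List.sorted vals' (fun x => x) false = L :=
        PySem.List.sorted_eq_of_perm_of_pairwise_lt vals' L (fun x => x) hperm hLpw
      simp only [parse_progress_milestones, parse_progress_milestones_alt, hblank,
        ← hparts, hA, hB]
      simp [hvne, hnn, hsorted, hL]
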